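-- pv_equiv track=rewrite | github.com/serdardoruk/Amazon-Online-Assessment-Python-Solutions | Questions/ZombieInMatrix.py | minHour
-- ===== SOURCE A (Python) =====
-- def minHour(grid):
-- 	rows = len(grid)
-- 	columns = len(grid[0])
--
-- 	if not rows or not columns:
-- 		return 0
--
-- 	q = [[i,j] for i in range(rows) for j in range(columns) if grid[i][j]==1]
-- 	directions = [[1, 0], [-1, 0], [0, 1], [0, -1]]
-- 	time = 0
--
-- 	while True:
-- 		new = []
-- 		for [i, j] in q:
-- 			for d in directions:
-- 				ni, nj = i + d[0], j + d[1]
-- 				if 0 <= ni < rows and 0 <= nj < columns and grid[ni][nj] == 0: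
-- 					grid[ni][nj] = 1
-- 					new.append([ni, nj])
-- 		q = new
-- 		if not q:
-- 			break
-- 		time += 1
--
-- 	return time
-- ===== SOURCE B (Python) =====
-- def minHour(grid):
--     # Round-free reformulation: keep a SET of infected cells (no grid mutation, no
--     # frontier list); each step recomputes the newly infectable cells from the whole
--     # set and counts the steps until it stops growing.
--     # NOTE: unlike the original, this does not mutate `grid`; equivalence is about
--     # the return value only.
--     rows = len(grid)
--     columns = len(grid[0])
--     if not rows or not columns:
--         return 0
--     infected = {(i, j) for i, row in enumerate(grid) for j, v in enumerate(row) if v == 1}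
--     t = 0
--     while True:
--         nxt = {(i + di, j + dj)
--                for (i, j) in infected
--                for (di, dj) in ((1, 0), (-1, 0), (0, 1), (0, -1))
--                if 0 <= i + di < rows and 0 <= j + dj < columns
--                and grid[i + di][j + dj] == 0
--                and (i + di, j + dj) not in infected}
--         if not nxt:
--             return t
--         infected |= nxt
--         t += 1
-- ===== Notes on version B (the rewrite author's own statement) =====
-- stated objective: alternative
-- what changed: A runs a batched frontier BFS that mutates the grid (marking infected cells 1) and carries an explicit next-frontier list per round, while B keeps an immutable grid and a growing SET of infected cells, recomputing the newly infectable cells from the whole set each step and counting steps until the set stops growing; …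
-- outside the precondition, e.g. on minHour([[0, 0], [0, 0, 1]]): A returns 0, B returns 3
import Mathlib
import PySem

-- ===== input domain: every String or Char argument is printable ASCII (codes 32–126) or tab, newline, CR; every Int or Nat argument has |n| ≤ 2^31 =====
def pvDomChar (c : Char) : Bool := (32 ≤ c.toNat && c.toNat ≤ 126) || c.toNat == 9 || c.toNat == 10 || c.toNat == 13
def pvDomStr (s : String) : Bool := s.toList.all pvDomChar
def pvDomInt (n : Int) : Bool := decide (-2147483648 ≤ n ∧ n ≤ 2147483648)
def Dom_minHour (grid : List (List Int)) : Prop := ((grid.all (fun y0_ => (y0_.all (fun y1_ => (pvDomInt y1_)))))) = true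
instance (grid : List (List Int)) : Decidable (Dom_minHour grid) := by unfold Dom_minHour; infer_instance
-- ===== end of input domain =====

-- B replaces A's grid-mutating batched-frontier BFS by an immutable-grid, growing
-- infected-SET fixpoint iteration (return value only: A mutates its argument, B does not).


-- ===== PORT A =====
-- grid[i][j] read / write for the guarded in-bounds accesses (0 ≤ i < rows, 0 ≤ j < cols)
def pvCellG (g : List (List Int)) (i j : Int) : Int := (g.getD i.toNat []).getD j.toNat 0
def pvCellS (g : List (List Int)) (i j : Int) : List (List Int) :=
  g.modify i.toNat (fun row => row.set j.toNat 1)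

def pvDirs : List (Int × Int) := [(1, 0), (-1, 0), (0, 1), (0, -1)]

-- one direction of A's inner loop: maybe infect neighbour c+d of frontier cell c
def pvAStep (rows cols : Int) (c : Int × Int) (st : List (List Int) × List (Int × Int))
    (d : Int × Int) : List (List Int) × List (Int × Int) :=
  if 0 ≤ c.1 + d.1 ∧ c.1 + d.1 < rows ∧ 0 ≤ c.2 + d.2 ∧ c.2 + d.2 < cols ∧
      pvCellG st.1 (c.1 + d.1) (c.2 + d.2) = 0 then
    (pvCellS st.1 (c.1 + d.1) (c.2 + d.2), st.2 ++ [(c.1 + d.1, c.2 + d.2)])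
  else st

def pvAVisit (rows cols : Int) (st : List (List Int) × List (Int × Int)) (c : Int × Int) :
    List (List Int) × List (Int × Int) :=
  pvDirs.foldl (pvAStep rows cols c) st

-- the 'while True' loop (fuel is only a totality guard; rows*cols+1 rounds always suffice)
def pvALoop (rows cols : Int) : Nat → List (List Int) → List (Int × Int) → Int → Int
  | 0, _, _, time => time
  | fuel + 1, g, q, time =>
    let st := q.foldl (pvAVisit rows cols) (g, [])
    if st.2 = [] then time else pvALoop rows cols fuel st.1 st.2 (time + 1)

def pvInitQ (grid : List (List Int)) (R C : Nat) : List (Int × Int) :=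
  (List.range R).flatMap fun (i : Nat) =>
    (List.range C).filterMap fun (j : Nat) =>
      if pvCellG grid (i : Int) (j : Int) = 1 then some ((i : Int), (j : Int)) else none

def minHour (grid : List (List Int)) : Int :=
  let R := grid.length
  let C := (grid.headD []).length
  if R = 0 ∨ C = 0 then 0
  else pvALoop (R : Int) (C : Int) (R * C + 1) grid (pvInitQ grid R C) 0

-- ===== PORT B =====
-- the set comprehension building nxt: scan the WHOLE infected set, four directions each
def pvBCand (grid : List (List Int)) (rows cols : Int) (inf : List (Int × Int)) :
    List (Int × Int) :=
  inf.foldl (fun acc c =>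
    pvDirs.foldl (fun acc d =>
      if 0 ≤ c.1 + d.1 ∧ c.1 + d.1 < rows ∧ 0 ≤ c.2 + d.2 ∧ c.2 + d.2 < cols ∧
          pvCellG grid (c.1 + d.1) (c.2 + d.2) = 0 ∧ (c.1 + d.1, c.2 + d.2) ∉ inf then
        PySem.Set.add acc (c.1 + d.1, c.2 + d.2)
      else acc) acc) []

def pvBLoop (grid : List (List Int)) (rows cols : Int) :
    Nat → List (Int × Int) → Int → Int
  | 0, _, t => t
  | fuel + 1, inf, t =>
    let nxt := pvBCand grid rows cols inf
    if nxt = [] then t else pvBLoop grid rows cols fuel (PySem.Set.union inf nxt) (t + 1)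

-- {(i, j) for i, row in enumerate(grid) for j, v in enumerate(row) if v == 1}
def pvInitB (grid : List (List Int)) : List (Int × Int) :=
  PySem.Set.ofList <|
    (PySem.List.enumerate grid 0).flatMap fun ir =>
      (PySem.List.enumerate ir.2 0).filterMap fun jv =>
        if jv.2 = 1 then some (ir.1, jv.1) else none

def minHour_alt (grid : List (List Int)) : Int :=
  let R := grid.length
  let C := (grid.headD []).length
  if R = 0 ∨ C = 0 then 0
  else pvBLoop grid (R : Int) (C : Int) (R * C + 1) (pvInitB grid) 0

-- ===== PRECONDITION & SPEC =====
-- Pre_ excludes the empty grid (A's len(grid[0]) raises IndexError) and, for columns > 0,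
-- ragged grids unless every extra cell past column len(grid[0])-1 is ≠ 1: rows shorter than
-- row 0 make A raise IndexError in its initial comprehension, and a 1 beyond row 0's width
-- is ignored by A's column-bounded scan but seen by B's row enumeration (malformed-input corner).
def Pre_minHour (grid : List (List Int)) : Prop :=
  grid ≠ [] ∧
  ((grid.headD []).length = 0 ∨
    ∀ row ∈ grid, (grid.headD []).length ≤ row.length ∧
      ∀ j, j < row.length → (grid.headD []).length ≤ j → row.getD j 0 ≠ 1)
instance (grid : List (List Int)) : Decidable (Pre_minHour grid) := by
  unfold Pre_minHour; infer_instance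

def pvWitness_minHour : List (List Int) := [[1, 0, 0], [0, 0, 0]]

def Spec_minHour (grid : List (List Int)) (out : Int) : Prop := out = minHour_alt grid
instance (grid : List (List Int)) (out : Int) : Decidable (Spec_minHour grid out) := by
  unfold Spec_minHour; infer_instance

-- ===== CLAIM (what is proved, stated in full; the proofs are below) =====
def Claim_equal_minHour : Prop :=
  ∀ (grid : List (List Int)), Dom_minHour grid → Pre_minHour grid →
    Spec_minHour grid (minHour grid)

-- ===== LEMMAS AND PROOFS =====

-- cell coordinates, in-bounds, adjacency, invariants
def pvInb (R C : Nat) (c : Int × Int) : Prop :=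
  0 ≤ c.1 ∧ c.1 < (R : Int) ∧ 0 ≤ c.2 ∧ c.2 < (C : Int)

def pvShape (R C : Nat) (g : List (List Int)) : Prop :=
  g.length = R ∧ ∀ k, k < R → C ≤ (g.getD k []).length

-- A's mutated grid equals the original grid with exactly the cells of S painted 1
def pvPaint (grid : List (List Int)) (R C : Nat) (g : List (List Int))
    (S : List (Int × Int)) : Prop :=
  ∀ c, pvInb R C c → pvCellG g c.1 c.2 = if c ∈ S then 1 else pvCellG grid c.1 c.2

def pvAdj (n c : Int × Int) : Prop := ∃ d ∈ pvDirs, c = (n.1 + d.1, n.2 + d.2)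

-- a cell that is still infectable relative to the infected set `inf`
def pvBase (grid : List (List Int)) (R C : Nat) (inf : List (Int × Int))
    (c : Int × Int) : Prop :=
  pvInb R C c ∧ pvCellG grid c.1 c.2 = 0 ∧ c ∉ inf

lemma pvShape_cellS {R C : Nat} {g : List (List Int)} (hs : pvShape R C g) (i j : Int) :
    pvShape R C (pvCellS g i j) := by
  obtain ⟨hl, hr⟩ := hs
  refine ⟨by simpa [pvCellS] using hl, ?_⟩
  intro k hk
  have h2 := hr k hk
  simp only [List.getD_eq_getElem?_getD, pvCellS, List.getElem?_modify] at h2 ⊢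
  cases h : g[k]? with
  | none => simp [h] at h2 ⊢; exact h2
  | some row =>
    simp [h] at h2 ⊢
    split_ifs <;> simpa using h2

lemma pvGetD_modify (g : List (List Int)) (n k : Nat) (f : List Int → List Int) :
    (g.modify n f).getD k [] = if n = k ∧ k < g.length then f (g.getD k []) else g.getD k [] := by
  rw [List.getD_eq_getElem?_getD, List.getElem?_modify]
  by_cases hk : k < g.length
  · rw [List.getElem?_eq_getElem hk]
    by_cases hnk : n = k
    · simp [hnk, hk, List.getD_eq_getElem?_getD]
    · simp [hnk, hk, List.getD_eq_getElem?_getD]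
  · rw [List.getElem?_eq_none (by omega)]
    rw [List.getD_eq_getElem?_getD, List.getElem?_eq_none (by omega)]
    simp [hk]

lemma pvGetD_set (row : List Int) (n k : Nat) (v : Int) :
    (row.set n v).getD k 0 = if n = k ∧ k < row.length then v else row.getD k 0 := by
  rw [List.getD_eq_getElem?_getD, List.getElem?_set]
  by_cases hnk : n = k
  · subst hnk
    by_cases hk : n < row.length
    · simp [hk]
    · rw [List.getD_eq_getElem?_getD, List.getElem?_eq_none (by omega)]
      simp [hk]
  · simp [hnk, List.getD_eq_getElem?_getD]

lemma pvCellG_cellS {R C : Nat} {g : List (List Int)} (hs : pvShape R C g)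
    {i j : Int} (hb : pvInb R C (i, j)) {i' j' : Int} (hb' : pvInb R C (i', j')) :
    pvCellG (pvCellS g i j) i' j' = if i' = i ∧ j' = j then 1 else pvCellG g i' j' := by
  obtain ⟨hl, hr⟩ := hs
  obtain ⟨h1, h2, h3, h4⟩ := hb
  obtain ⟨h1', h2', h3', h4'⟩ := hb'
  simp only [] at h1 h2 h3 h4 h1' h2' h3' h4'
  have hrow : C ≤ (g.getD i.toNat []).length := hr i.toNat (by omega)
  simp only [pvCellG, pvCellS, pvGetD_modify]
  by_cases hii : i' = i
  · subst hii
    rw [if_pos ⟨by omega, by omega⟩, pvGetD_set]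
    by_cases hjj : j' = j
    · subst hjj
      rw [if_pos ⟨by omega, by omega⟩, if_pos ⟨rfl, rfl⟩]
    · rw [if_neg (by omega), if_neg (by simp [hjj])]
  · rw [if_neg (by omega), if_neg (by simp [hii])]

lemma pvPaint_congr {grid : List (List Int)} {R C : Nat} {g : List (List Int)}
    {S T : List (Int × Int)} (hp : pvPaint grid R C g S)
    (h : ∀ c, c ∈ S ↔ c ∈ T) : pvPaint grid R C g T := by
  intro c hc
  rw [pvPaint]  at hp
  have := hp c hc
  by_cases hm : c ∈ S
  · simp [hm, (h c).1 hm] at this ⊢; exact this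
  · have hm' : c ∉ T := fun ht => hm ((h c).2 ht)
    simp [hm, hm'] at this ⊢; exact this

lemma pvPaint_update {grid : List (List Int)} {R C : Nat} {g : List (List Int)}
    {S : List (Int × Int)} (hs : pvShape R C g) (hp : pvPaint grid R C g S)
    {c : Int × Int} (hb : pvInb R C c) :
    pvPaint grid R C (pvCellS g c.1 c.2) (S ++ [c]) := by
  intro c' hc'
  have hcc : (c.1, c.2) = c := rfl
  rw [pvCellG_cellS hs (by rw [hcc]; exact hb) hc']
  have heq : (c'.1 = c.1 ∧ c'.2 = c.2) ↔ c' = c := by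
    constructor
    · rintro ⟨ha, hb2⟩; exact Prod.ext ha hb2
    · rintro rfl; exact ⟨rfl, rfl⟩
  by_cases hm : c' = c
  · simp [hm]
  · rw [if_neg (fun h => hm (heq.1 h))]
    rw [hp c' hc']
    have : c' ∈ S ++ [c] ↔ c' ∈ S := by simp [hm]
    simp [this]

lemma pvPaint_zero_iff {grid : List (List Int)} {R C : Nat} {g : List (List Int)}
    {S : List (Int × Int)} (hp : pvPaint grid R C g S) {c : Int × Int}
    (hb : pvInb R C c) :
    pvCellG g c.1 c.2 = 0 ↔ (c ∉ S ∧ pvCellG grid c.1 c.2 = 0) := by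
  have := hp c hb
  by_cases hm : c ∈ S
  · simp [hm] at this ⊢; omega
  · simp [hm] at this ⊢; rw [this]

-- ==== A's inner (direction) fold ====
lemma pvAStep_fold (grid : List (List Int)) (R C : Nat) (inf : List (Int × Int))
    (x : Int × Int) (ds : List (Int × Int)) :
    ∀ (g : List (List Int)) (acc : List (Int × Int)),
      pvShape R C g → pvPaint grid R C g (inf ++ acc) →
      (∀ c ∈ acc, pvBase grid R C inf c) →
      pvShape R C (ds.foldl (pvAStep (R : Int) (C : Int) x) (g, acc)).1 ∧
      pvPaint grid R C (ds.foldl (pvAStep (R : Int) (C : Int) x) (g, acc)).1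
        (inf ++ (ds.foldl (pvAStep (R : Int) (C : Int) x) (g, acc)).2) ∧
      (∀ c ∈ (ds.foldl (pvAStep (R : Int) (C : Int) x) (g, acc)).2, pvBase grid R C inf c) ∧
      (∀ c ∈ acc, c ∈ (ds.foldl (pvAStep (R : Int) (C : Int) x) (g, acc)).2) ∧
      (∀ c ∈ (ds.foldl (pvAStep (R : Int) (C : Int) x) (g, acc)).2,
        c ∈ acc ∨ ∃ d ∈ ds, c = (x.1 + d.1, x.2 + d.2)) ∧
      (∀ d ∈ ds, pvBase grid R C inf (x.1 + d.1, x.2 + d.2) →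
        (x.1 + d.1, x.2 + d.2) ∈ (ds.foldl (pvAStep (R : Int) (C : Int) x) (g, acc)).2) := by
  induction ds with
  | nil =>
    intro g acc hs hp hacc
    simp only [List.foldl_nil]
    exact ⟨hs, hp, hacc, fun c hc => hc, fun c hc => Or.inl hc, by simp⟩
  | cons d ds ih =>
    intro g acc hs hp hacc
    simp only [List.foldl_cons]
    by_cases hcond : 0 ≤ x.1 + d.1 ∧ x.1 + d.1 < (R : Int) ∧ 0 ≤ x.2 + d.2 ∧
        x.2 + d.2 < (C : Int) ∧ pvCellG g (x.1 + d.1) (x.2 + d.2) = 0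
    · have hstep : pvAStep (R : Int) (C : Int) x (g, acc) d =
          (pvCellS g (x.1 + d.1) (x.2 + d.2), acc ++ [(x.1 + d.1, x.2 + d.2)]) := by
        simp only [pvAStep]; rw [if_pos hcond]
      rw [hstep]
      have hbnc : pvInb R C (x.1 + d.1, x.2 + d.2) :=
        ⟨hcond.1, hcond.2.1, hcond.2.2.1, hcond.2.2.2.1⟩
      have hz := (pvPaint_zero_iff hp hbnc).1 hcond.2.2.2.2
      have hnotin : (x.1 + d.1, x.2 + d.2) ∉ inf ++ acc := hz.1
      have horig : pvCellG grid (x.1 + d.1) (x.2 + d.2) = 0 := hz.2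
      have hs' : pvShape R C (pvCellS g (x.1 + d.1) (x.2 + d.2)) := pvShape_cellS hs _ _
      have hp' : pvPaint grid R C (pvCellS g (x.1 + d.1) (x.2 + d.2))
          (inf ++ (acc ++ [(x.1 + d.1, x.2 + d.2)])) := by
        have hpu := pvPaint_update hs hp hbnc
        rw [List.append_assoc] at hpu
        exact hpu
      have hacc' : ∀ c ∈ acc ++ [(x.1 + d.1, x.2 + d.2)], pvBase grid R C inf c := by
        intro c hc
        rcases List.mem_append.1 hc with h | h
        · exact hacc c h
        · simp at h; subst h
          exact ⟨hbnc, horig, fun hmem => hnotin (List.mem_append.2 (Or.inl hmem))⟩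
      obtain ⟨c1, c2, c3, c4, c5, c6⟩ := ih (pvCellS g (x.1 + d.1) (x.2 + d.2))
        (acc ++ [(x.1 + d.1, x.2 + d.2)]) hs' hp' hacc'
      refine ⟨c1, c2, c3, ?_, ?_, ?_⟩
      · intro c hc; exact c4 c (List.mem_append.2 (Or.inl hc))
      · intro c hc
        rcases c5 c hc with h | h
        · rcases List.mem_append.1 h with h' | h'
          · exact Or.inl h'
          · simp at h'; exact Or.inr ⟨d, by simp, h'⟩
        · obtain ⟨d', hd', he⟩ := h
          exact Or.inr ⟨d', by simp [hd'], he⟩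
      · intro d' hd' hbase
        rcases List.mem_cons.1 hd' with h | h
        · subst h
          exact c4 _ (List.mem_append.2 (Or.inr (by simp)))
        · exact c6 d' h hbase
    · have hstep : pvAStep (R : Int) (C : Int) x (g, acc) d = (g, acc) := by
        simp only [pvAStep]; rw [if_neg hcond]
      rw [hstep]
      obtain ⟨c1, c2, c3, c4, c5, c6⟩ := ih g acc hs hp hacc
      refine ⟨c1, c2, c3, c4, ?_, ?_⟩
      · intro c hc
        rcases c5 c hc with h | h
        · exact Or.inl h
        · obtain ⟨d', hd', he⟩ := h
          exact Or.inr ⟨d', by simp [hd'], he⟩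
      · intro d' hd' hbase
        rcases List.mem_cons.1 hd' with h | h
        · rw [h] at hbase ⊢
          obtain ⟨hbnc, horig, hninf⟩ := hbase
          have hnz : ¬ pvCellG g (x.1 + d.1) (x.2 + d.2) = 0 := fun hzz =>
            hcond ⟨hbnc.1, hbnc.2.1, hbnc.2.2.1, hbnc.2.2.2, hzz⟩
          have hmem : (x.1 + d.1, x.2 + d.2) ∈ inf ++ acc := by
            by_contra hno
            exact hnz ((pvPaint_zero_iff hp hbnc).2 ⟨hno, horig⟩)
          rcases List.mem_append.1 hmem with h' | h'
          · exact absurd h' hninf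
          · exact c4 _ h'
        · exact c6 d' h hbase

-- ==== A's round: fold over the frontier ====
lemma pvAVisit_fold (grid : List (List Int)) (R C : Nat) (inf : List (Int × Int))
    (q : List (Int × Int)) :
    ∀ (g : List (List Int)) (acc : List (Int × Int)),
      pvShape R C g → pvPaint grid R C g (inf ++ acc) →
      (∀ c ∈ acc, pvBase grid R C inf c) →
      pvShape R C (q.foldl (pvAVisit (R : Int) (C : Int)) (g, acc)).1 ∧
      pvPaint grid R C (q.foldl (pvAVisit (R : Int) (C : Int)) (g, acc)).1
        (inf ++ (q.foldl (pvAVisit (R : Int) (C : Int)) (g, acc)).2) ∧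
      (∀ c ∈ (q.foldl (pvAVisit (R : Int) (C : Int)) (g, acc)).2, pvBase grid R C inf c) ∧
      (∀ c ∈ acc, c ∈ (q.foldl (pvAVisit (R : Int) (C : Int)) (g, acc)).2) ∧
      (∀ c ∈ (q.foldl (pvAVisit (R : Int) (C : Int)) (g, acc)).2,
        c ∈ acc ∨ ∃ n ∈ q, pvAdj n c) ∧
      (∀ c, pvBase grid R C inf c → (∃ n ∈ q, pvAdj n c) →
        c ∈ (q.foldl (pvAVisit (R : Int) (C : Int)) (g, acc)).2) := by
  induction q with
  | nil =>
    intro g acc hs hp hacc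
    simp only [List.foldl_nil]
    refine ⟨hs, hp, hacc, fun c hc => hc, fun c hc => Or.inl hc, ?_⟩
    rintro c _ ⟨n, hn, _⟩
    simp at hn
  | cons n q ih =>
    intro g acc hs hp hacc
    simp only [List.foldl_cons]
    obtain ⟨a1, a2, a3, a4, a5, a6⟩ := pvAStep_fold grid R C inf n pvDirs g acc hs hp hacc
    have hst : pvAVisit (R : Int) (C : Int) (g, acc) n =
        ((pvDirs.foldl (pvAStep (R : Int) (C : Int) n) (g, acc)).1,
         (pvDirs.foldl (pvAStep (R : Int) (C : Int) n) (g, acc)).2) := rfl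
    rw [hst]
    obtain ⟨b1, b2, b3, b4, b5, b6⟩ := ih _ _ a1 a2 a3
    refine ⟨b1, b2, b3, ?_, ?_, ?_⟩
    · intro c hc; exact b4 c (a4 c hc)
    · intro c hc
      rcases b5 c hc with h | h
      · rcases a5 c h with h' | h'
        · exact Or.inl h'
        · exact Or.inr ⟨n, by simp, h'⟩
      · obtain ⟨n', hn', he⟩ := h
        exact Or.inr ⟨n', by simp [hn'], he⟩
    · rintro c hbase ⟨n', hn', hadj⟩
      rcases List.mem_cons.1 hn' with h | h
      · obtain ⟨d, hd, he⟩ := hadj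
        rw [h] at he
        rw [he]
        exact b4 _ (a6 d hd (he ▸ hbase))
      · exact b6 c hbase ⟨n', h, hadj⟩

-- ==== B's candidate set characterisation ====
lemma pvBCand_dirs (grid : List (List Int)) (R C : Nat) (inf : List (Int × Int))
    (x : Int × Int) (ds : List (Int × Int)) :
    ∀ (acc : List (Int × Int)) (c : Int × Int),
      c ∈ ds.foldl (fun acc d =>
          if 0 ≤ x.1 + d.1 ∧ x.1 + d.1 < (R : Int) ∧ 0 ≤ x.2 + d.2 ∧ x.2 + d.2 < (C : Int) ∧
              pvCellG grid (x.1 + d.1) (x.2 + d.2) = 0 ∧ (x.1 + d.1, x.2 + d.2) ∉ inf then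
            PySem.Set.add acc (x.1 + d.1, x.2 + d.2)
          else acc) acc ↔
        c ∈ acc ∨ (pvBase grid R C inf c ∧ ∃ d ∈ ds, c = (x.1 + d.1, x.2 + d.2)) := by
  induction ds with
  | nil => intro acc c; simp
  | cons d ds ih =>
    intro acc c
    simp only [List.foldl_cons]
    by_cases hcond : 0 ≤ x.1 + d.1 ∧ x.1 + d.1 < (R : Int) ∧ 0 ≤ x.2 + d.2 ∧
        x.2 + d.2 < (C : Int) ∧ pvCellG grid (x.1 + d.1) (x.2 + d.2) = 0 ∧
        (x.1 + d.1, x.2 + d.2) ∉ inf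
    · rw [if_pos hcond, ih, PySem.Set.mem_add]
      constructor
      · rintro ((h | rfl) | ⟨hb, d', hd', he⟩)
        · exact Or.inl h
        · exact Or.inr ⟨⟨⟨hcond.1, hcond.2.1, hcond.2.2.1, hcond.2.2.2.1⟩,
            hcond.2.2.2.2.1, hcond.2.2.2.2.2⟩, d, by simp, rfl⟩
        · exact Or.inr ⟨hb, d', by simp [hd'], he⟩
      · rintro (h | ⟨hb, d', hd', he⟩)
        · exact Or.inl (Or.inl h)
        · rcases List.mem_cons.1 hd' with h' | h'
          · rw [h'] at he; exact Or.inl (Or.inr he)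
          · exact Or.inr ⟨hb, d', h', he⟩
    · rw [if_neg hcond, ih]
      constructor
      · rintro (h | ⟨hb, d', hd', he⟩)
        · exact Or.inl h
        · exact Or.inr ⟨hb, d', by simp [hd'], he⟩
      · rintro (h | ⟨hb, d', hd', he⟩)
        · exact Or.inl h
        · rcases List.mem_cons.1 hd' with h' | h'
          · exfalso
            rw [h'] at he
            rw [he] at hb
            exact hcond ⟨hb.1.1, hb.1.2.1, hb.1.2.2.1, hb.1.2.2.2, hb.2.1, hb.2.2⟩
          · exact Or.inr ⟨hb, d', h', he⟩

lemma pvBCand_mem (grid : List (List Int)) (R C : Nat) (inf : List (Int × Int))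
    (c : Int × Int) :
    c ∈ pvBCand grid (R : Int) (C : Int) inf ↔
      pvBase grid R C inf c ∧ ∃ n ∈ inf, pvAdj n c := by
  have hfold : ∀ (l : List (Int × Int)) (acc : List (Int × Int)),
      c ∈ l.foldl (fun acc x =>
        pvDirs.foldl (fun acc d =>
          if 0 ≤ x.1 + d.1 ∧ x.1 + d.1 < (R : Int) ∧ 0 ≤ x.2 + d.2 ∧ x.2 + d.2 < (C : Int) ∧
              pvCellG grid (x.1 + d.1) (x.2 + d.2) = 0 ∧ (x.1 + d.1, x.2 + d.2) ∉ inf then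
            PySem.Set.add acc (x.1 + d.1, x.2 + d.2)
          else acc) acc) acc ↔
      c ∈ acc ∨ (pvBase grid R C inf c ∧ ∃ n ∈ l, pvAdj n c) := by
    intro l
    induction l with
    | nil => intro acc; simp
    | cons n ls ih =>
      intro acc
      simp only [List.foldl_cons]
      rw [ih, pvBCand_dirs grid R C inf n pvDirs acc c]
      unfold pvAdj
      constructor
      · rintro ((h | ⟨hb, hd⟩) | ⟨hb, n', hn', hd⟩)
        · exact Or.inl h
        · exact Or.inr ⟨hb, n, by simp, hd⟩
        · exact Or.inr ⟨hb, n', by simp [hn'], hd⟩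
      · rintro (h | ⟨hb, n', hn', hd⟩)
        · exact Or.inl (Or.inl h)
        · rcases List.mem_cons.1 hn' with h' | h'
          · rw [h'] at hd; exact Or.inl (Or.inr ⟨hb, hd⟩)
          · exact Or.inr ⟨hb, n', h', hd⟩
  have := hfold inf []
  simp only [List.not_mem_nil, false_or] at this
  rw [pvBCand]
  exact this

-- ==== the two loops agree ====
lemma pvLoop_eq (grid : List (List Int)) (R C : Nat) :
    ∀ (fuel : Nat) (g : List (List Int)) (q inf : List (Int × Int)) (time : Int),
      pvShape R C g → pvPaint grid R C g inf →
      (∀ c ∈ q, c ∈ inf) →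
      (∀ c, pvBase grid R C inf c → (∃ n ∈ inf, pvAdj n c) → ∃ n ∈ q, pvAdj n c) →
      pvALoop (R : Int) (C : Int) fuel g q time =
        pvBLoop grid (R : Int) (C : Int) fuel inf time := by
  intro fuel
  induction fuel with
  | zero => intro g q inf time _ _ _ _; rfl
  | succ fuel ih =>
    intro g q inf time hs hp hq hf
    have hpe : pvPaint grid R C g (inf ++ []) := by simpa using hp
    obtain ⟨a1, a2, a3, a4, a5, a6⟩ := pvAVisit_fold grid R C inf q g [] hs hpe (by simp)
    rw [pvALoop, pvBLoop]
    set st := q.foldl (pvAVisit (R : Int) (C : Int)) (g, []) with hstdef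
    set nxt := pvBCand grid (R : Int) (C : Int) inf with hnxtdef
    have hmem : ∀ c, c ∈ st.2 ↔ c ∈ nxt := by
      intro c
      rw [hnxtdef, pvBCand_mem grid R C inf c]
      constructor
      · intro hc
        rcases a5 c hc with h | h
        · simp at h
        · obtain ⟨n, hn, hadj⟩ := h
          exact ⟨a3 c hc, n, hq n hn, hadj⟩
      · rintro ⟨hb, n, hn, hadj⟩
        exact a6 c hb (hf c hb ⟨n, hn, hadj⟩)
    by_cases he : st.2 = []
    · have hne : nxt = [] := by
        rw [List.eq_nil_iff_forall_not_mem]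
        intro c hc
        exact (List.eq_nil_iff_forall_not_mem.1 he c) ((hmem c).2 hc)
      rw [if_pos he, if_pos hne]
    · have hne : nxt ≠ [] := by
        intro h0
        exact he (List.eq_nil_iff_forall_not_mem.2 fun c hc =>
          (List.eq_nil_iff_forall_not_mem.1 h0 c) ((hmem c).1 hc))
      rw [if_neg he, if_neg hne]
      apply ih st.1 st.2 (PySem.Set.union inf nxt) (time + 1) a1
      · refine pvPaint_congr a2 ?_
        intro c
        rw [List.mem_append, PySem.Set.mem_union, hmem c]
      · intro c hc
        exact PySem.Set.mem_union inf nxt c |>.2 (Or.inr ((hmem c).1 hc))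
      · intro c hb hadj
        have hbinf : pvBase grid R C inf c :=
          ⟨hb.1, hb.2.1, fun h => hb.2.2 ((PySem.Set.mem_union inf nxt c).2 (Or.inl h))⟩
        obtain ⟨n, hn, hadj'⟩ := hadj
        rcases (PySem.Set.mem_union inf nxt n).1 hn with h | h
        · exfalso
          exact hb.2.2 ((PySem.Set.mem_union inf nxt c).2
            (Or.inr ((pvBCand_mem grid R C inf c).2 ⟨hbinf, n, h, hadj'⟩)))
        · exact ⟨n, (hmem n).2 h, hadj'⟩

-- ==== initial states ====
lemma mem_pvInitQ (grid : List (List Int)) (R C : Nat) (c : Int × Int) :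
    c ∈ pvInitQ grid R C ↔ pvInb R C c ∧ pvCellG grid c.1 c.2 = 1 := by
  rw [pvInitQ]
  constructor
  · intro hc
    obtain ⟨i, hi, hc2⟩ := List.mem_flatMap.1 hc
    obtain ⟨j, hj, hsome⟩ := List.mem_filterMap.1 hc2
    rw [List.mem_range] at hi hj
    split_ifs at hsome with h
    · have hc3 : ((i : Int), (j : Int)) = c := by simpa using hsome
      subst hc3
      exact ⟨⟨by simp, by simpa using hi, by simp, by simpa using hj⟩, h⟩
  · rintro ⟨⟨b1, b2, b3, b4⟩, hv⟩
    have h1 : ((c.1.toNat : Nat) : Int) = c.1 := Int.toNat_of_nonneg b1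
    have h2 : ((c.2.toNat : Nat) : Int) = c.2 := Int.toNat_of_nonneg b3
    refine List.mem_flatMap.2 ⟨c.1.toNat, List.mem_range.2 (by omega), ?_⟩
    refine List.mem_filterMap.2 ⟨c.2.toNat, List.mem_range.2 (by omega), ?_⟩
    rw [if_pos]
    · rw [h1, h2]
    · rw [h1, h2]; exact hv

lemma mem_pvInitB (grid : List (List Int))
    (hpre : ∀ row ∈ grid, (grid.headD []).length ≤ row.length ∧
      ∀ j, j < row.length → (grid.headD []).length ≤ j → row.getD j 0 ≠ 1)
    (c : Int × Int) :
    c ∈ pvInitB grid ↔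
      pvInb grid.length (grid.headD []).length c ∧ pvCellG grid c.1 c.2 = 1 := by
  rw [pvInitB, PySem.Set.mem_ofList, PySem.List.enumerate_eq_map_pyRange grid []]
  constructor
  · intro hc
    obtain ⟨ir, hir, hc2⟩ := List.mem_flatMap.1 hc
    obtain ⟨i, hi, rfl⟩ := List.mem_map.1 hir
    rw [PySem.List.mem_pyRange_one] at hi
    rw [PySem.List.enumerate_eq_map_pyRange _ (0 : Int)] at hc2
    obtain ⟨jv, hjv, hsome⟩ := List.mem_filterMap.1 hc2
    obtain ⟨j, hj, rfl⟩ := List.mem_map.1 hjv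
    rw [PySem.List.mem_pyRange_one] at hj
    simp only [PySem.List.len] at hi hj
    have hiN : i.toNat < grid.length := by omega
    have hrow_eq : PySem.List.pyGetD grid i [] = grid.getD i.toNat [] := by
      have h := PySem.List.pyGetD_natCast grid i.toNat ([] : List Int)
      rwa [Int.toNat_of_nonneg hi.1] at h
    have hval_eq : ∀ v : Int, PySem.List.pyGetD (PySem.List.pyGetD grid i []) j v =
        (grid.getD i.toNat []).getD j.toNat v := by
      intro v
      rw [hrow_eq]
      have h := PySem.List.pyGetD_natCast (grid.getD i.toNat []) j.toNat v
      rwa [Int.toNat_of_nonneg hj.1] at h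
    have hrow_mem : grid.getD i.toNat [] ∈ grid := by
      rw [List.getD_eq_getElem?_getD, List.getElem?_eq_getElem hiN]
      exact List.getElem_mem hiN
    have hjN : j.toNat < (grid.getD i.toNat []).length := by
      rw [hrow_eq] at hj; omega
    split_ifs at hsome with h
    · have hc3 : (i, j) = c := by simpa using hsome
      subst hc3
      have h1 : (grid.getD i.toNat []).getD j.toNat 0 = 1 := by
        rw [← hval_eq]; simpa using h
      have hjC : j.toNat < (grid.headD []).length := by
        by_contra hge
        exact (hpre _ hrow_mem).2 j.toNat hjN (by omega) h1
      exact ⟨⟨hi.1, by omega, hj.1, by omega⟩, h1⟩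
  · rintro ⟨⟨b1, b2, b3, b4⟩, hv⟩
    have hiN : c.1.toNat < grid.length := by omega
    have hrow_eq : PySem.List.pyGetD grid c.1 [] = grid.getD c.1.toNat [] := by
      have h := PySem.List.pyGetD_natCast grid c.1.toNat ([] : List Int)
      rwa [Int.toNat_of_nonneg b1] at h
    have hrow_mem : grid.getD c.1.toNat [] ∈ grid := by
      rw [List.getD_eq_getElem?_getD, List.getElem?_eq_getElem hiN]
      exact List.getElem_mem hiN
    have hlenC : (grid.headD []).length ≤ (grid.getD c.1.toNat []).length :=
      (hpre _ hrow_mem).1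
    have hval_eq : PySem.List.pyGetD (PySem.List.pyGetD grid c.1 []) c.2 0 =
        (grid.getD c.1.toNat []).getD c.2.toNat 0 := by
      rw [hrow_eq]
      have h := PySem.List.pyGetD_natCast (grid.getD c.1.toNat []) c.2.toNat (0 : Int)
      rwa [Int.toNat_of_nonneg b3] at h
    refine List.mem_flatMap.2 ⟨(c.1, PySem.List.pyGetD grid c.1 []), ?_, ?_⟩
    · exact List.mem_map.2 ⟨c.1, PySem.List.mem_pyRange_one.2
        ⟨b1, by simp only [PySem.List.len]; omega⟩, rfl⟩
    · rw [PySem.List.enumerate_eq_map_pyRange _ (0 : Int)]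
      refine List.mem_filterMap.2
        ⟨(c.2, PySem.List.pyGetD (PySem.List.pyGetD grid c.1 []) c.2 0), ?_, ?_⟩
      · refine List.mem_map.2 ⟨c.2, PySem.List.mem_pyRange_one.2 ⟨b3, ?_⟩, rfl⟩
        simp only [PySem.List.len]
        rw [hrow_eq]
        omega
      · have hcond : (c.2, PySem.List.pyGetD (PySem.List.pyGetD grid c.1 []) c.2 0).2 = 1 := by
          simpa [hval_eq, pvCellG] using hv
        rw [if_pos hcond]


-- ===== VERDICT (by name: the statement is the Claim_ definition above) =====
theorem minHour_spec : Claim_equal_minHour := by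
  intro grid _ hpre
  obtain ⟨hne, hrect⟩ := hpre
  unfold Spec_minHour
  simp only [minHour, minHour_alt]
  split_ifs with h
  · rfl
  · have hC : (grid.headD []).length ≠ 0 := fun h0 => h (Or.inr h0)
    have hpre2 : ∀ row ∈ grid, (grid.headD []).length ≤ row.length ∧
        ∀ j, j < row.length → (grid.headD []).length ≤ j → row.getD j 0 ≠ 1 :=
      hrect.resolve_left hC
    have hshape : pvShape grid.length (grid.headD []).length grid := by
      refine ⟨rfl, fun k hk => ?_⟩
      have hmem : grid.getD k [] ∈ grid := by
        rw [List.getD_eq_getElem?_getD, List.getElem?_eq_getElem hk]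
        exact List.getElem_mem hk
      exact (hpre2 _ hmem).1
    have hpaint : pvPaint grid grid.length (grid.headD []).length grid (pvInitB grid) := by
      intro c hc
      by_cases hm : c ∈ pvInitB grid
      · rw [if_pos hm]
        exact ((mem_pvInitB grid hpre2 c).1 hm).2
      · rw [if_neg hm]
    have hsub : ∀ c ∈ pvInitQ grid grid.length (grid.headD []).length, c ∈ pvInitB grid := by
      intro c hc
      exact (mem_pvInitB grid hpre2 c).2
        ((mem_pvInitQ grid grid.length (grid.headD []).length c).1 hc)
    have hfront : ∀ c, pvBase grid grid.length (grid.headD []).length (pvInitB grid) c →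
        (∃ n ∈ pvInitB grid, pvAdj n c) →
        ∃ n ∈ pvInitQ grid grid.length (grid.headD []).length, pvAdj n c := by
      rintro c _ ⟨n, hn, hadj⟩
      exact ⟨n, (mem_pvInitQ grid grid.length (grid.headD []).length n).2
        ((mem_pvInitB grid hpre2 n).1 hn), hadj⟩
    exact pvLoop_eq grid grid.length (grid.headD []).length
      (grid.length * (grid.headD []).length + 1) grid
      (pvInitQ grid grid.length (grid.headD []).length) (pvInitB grid) 0
      hshape hpaint hsub hfront
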